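-- pv_equiv track=rewrite | github.com/martinfq/TCS_EC_LunchForm | main.py | filter_form_data_by_group
-- ===== SOURCE A (Python) =====
-- def filter_form_data_by_group(data: dict, n: int) -> dict:
--     if not 1 <= n <= 5:
--         raise ValueError("El parámetro n debe estar entre 1 y 5")
--
--     keys = list(data.keys())
--
--     if len(keys) < 2:
--         raise ValueError("Se requieren al menos 2 elementos iniciales")
--
--     # Siempre incluir los primeros 2
--     selected_keys = keys[:2]
--
--     remaining = keys[2:]
--
--     for i in range(0, len(remaining), 5):
--         group = remaining[i:i + 5]
--
--         if len(group) < 5: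
--             raise ValueError(
--                 f"Grupo incompleto en la posición {i // 5 + 1}: "
--                 f"esperados 5 elementos, encontrados {len(group)}"
--             )
--
--         selected_keys.append(group[n - 1])  # n es 1-based
--
--     return {k: data[k] for k in selected_keys}
-- ===== SOURCE B (Python) =====
-- def filter_form_data_by_group(data: dict, n: int) -> dict:
--     if not 1 <= n <= 5:
--         raise ValueError("El parámetro n debe estar entre 1 y 5")
--
--     items = list(data.items())
--
--     if len(items) < 2:
--         raise ValueError("Se requieren al menos 2 elementos iniciales")
--
--     full, rem = divmod(len(items) - 2, 5)
--     if rem != 0: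
--         raise ValueError(
--             f"Grupo incompleto en la posición {full + 1}: "
--             f"esperados 5 elementos, encontrados {rem}"
--         )
--
--     return dict(items[:2] + [items[2 + 5 * j + (n - 1)] for j in range(full)])
-- ===== Notes on version B (the rewrite author's own statement) =====
-- stated objective: simpler
-- what changed: B replaces A's slice-by-5 validation loop (building each 5-element group and checking its length) with a single divmod check on len-2 followed by direct arithmetic indexing 2+5j+(n-1) into the item list, building the result from whole (key,value) items instead of selected keys looked up again in the dict.
import Mathlib
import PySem

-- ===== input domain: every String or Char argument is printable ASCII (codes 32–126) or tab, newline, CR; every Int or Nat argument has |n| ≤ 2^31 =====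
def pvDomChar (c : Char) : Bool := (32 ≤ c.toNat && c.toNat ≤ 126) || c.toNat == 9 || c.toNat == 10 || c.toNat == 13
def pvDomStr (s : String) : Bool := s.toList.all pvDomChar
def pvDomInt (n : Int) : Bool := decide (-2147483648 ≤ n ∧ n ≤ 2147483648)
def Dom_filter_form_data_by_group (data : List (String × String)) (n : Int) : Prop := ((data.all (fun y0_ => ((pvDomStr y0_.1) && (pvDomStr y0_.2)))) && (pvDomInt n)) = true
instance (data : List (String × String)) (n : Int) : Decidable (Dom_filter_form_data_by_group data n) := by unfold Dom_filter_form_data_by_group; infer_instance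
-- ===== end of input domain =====

-- B replaces A's slice-by-5 validation loop with a single divmod check plus direct
-- arithmetic indexing into the item list (objective: simpler; same error behaviour).

-- ===== PORT A =====
-- loop body of A's 'for i in range(0, len(remaining), 5)': none = the ValueError path
def pvAStep (remaining : List String) (n : Int) (acc : Option (List String)) (i : Int) : Option (List String) :=
  acc.bind (fun sel =>
    let group := PySem.List.slice remaining (some i) (some (i + 5))
    if group.length < 5 then none
    else some (sel ++ [PySem.List.pyGetD group (n - 1) ""]))

def filter_form_data_by_group (data : List (String × String)) (n : Int) : List (String × String) :=
  if ¬ (1 ≤ n ∧ n ≤ 5) then []       -- raise ValueError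
  else if (data.map Prod.fst).length < 2 then []       -- raise ValueError
  else                                -- keys[:2], keys[2:], the stride-5 loop
    match (PySem.List.pyRange 0 (PySem.List.slice (data.map Prod.fst) (some 2) none).length 5).foldl
        (pvAStep (PySem.List.slice (data.map Prod.fst) (some 2) none) n)
        (some (PySem.List.slice (data.map Prod.fst) none (some 2))) with
    | none => []                     -- raise ValueError (incomplete group)
    | some sel => sel.map (fun k => (k, (data.lookup k).getD ""))

-- ===== PORT B =====
def filter_form_data_by_group_alt (data : List (String × String)) (n : Int) : List (String × String) :=
  if ¬ (1 ≤ n ∧ n ≤ 5) then []      -- raise ValueError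
  else if data.length < 2 then []   -- raise ValueError
  else if PySem.Int.mod ((data.length : Int) - 2) 5 ≠ 0 then []   -- raise ValueError (incomplete trailing group)
  else
    data.take 2 ++ (List.range (PySem.Int.floordiv ((data.length : Int) - 2) 5).toNat).map
      (fun j : Nat => PySem.List.pyGetD data (2 + 5 * (j : Int) + (n - 1)) ("", ""))

-- ===== PRECONDITION & SPEC =====
-- Pre_ excludes exactly the inputs where the Python raises ValueError (n outside 1..5,
-- fewer than 2 entries, or a trailing incomplete group), and lists with duplicate keys,
-- which cannot occur as a Python dict.
def Pre_filter_form_data_by_group (data : List (String × String)) (n : Int) : Prop :=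
  1 ≤ n ∧ n ≤ 5 ∧ 2 ≤ data.length ∧ (data.length - 2) % 5 = 0 ∧ (data.map Prod.fst).Nodup
instance (data : List (String × String)) (n : Int) : Decidable (Pre_filter_form_data_by_group data n) := by unfold Pre_filter_form_data_by_group; infer_instance

def pvWitness_filter_form_data_by_group : (List (String × String)) × Int :=
  ([("a", "1"), ("b", "2"), ("c", "3"), ("d", "4"), ("e", "5"), ("f", "6"), ("g", "7")], 2)

def Spec_filter_form_data_by_group (data : List (String × String)) (n : Int) (out : List (String × String)) : Prop := out = filter_form_data_by_group_alt data n
instance (data : List (String × String)) (n : Int) (out : List (String × String)) : Decidable (Spec_filter_form_data_by_group data n out) := by unfold Spec_filter_form_data_by_group; infer_instance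

-- ===== CLAIM (what is proved, stated in full; the proofs are below) =====
def Claim_equal_filter_form_data_by_group : Prop := ∀ (data : List (String × String)) (n : Int), Dom_filter_form_data_by_group data n → Pre_filter_form_data_by_group data n → Spec_filter_form_data_by_group data n (filter_form_data_by_group data n)

-- ===== LEMMAS AND PROOFS =====

-- first-match lookup of the key of a member, under distinct keys, yields that member's value
theorem pv_lookup_eq_of_mem {p : String × String} {data : List (String × String)}
    (hnd : (data.map Prod.fst).Nodup) (hp : p ∈ data) : data.lookup p.1 = some p.2 := by
  induction data with
  | nil => simp at hp
  | cons q rest ih =>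
    simp only [List.map_cons, List.nodup_cons] at hnd
    rcases List.mem_cons.mp hp with h | h
    · subst h; simp [List.lookup]
    · have hne : (p.1 == q.1) = false := by
        refine beq_eq_false_iff_ne.mpr (fun he => hnd.1 ?_)
        exact he ▸ List.mem_map_of_mem h
      simp [List.lookup, hne, ih hnd.2 h]

-- A's validation loop over full groups: collects remaining[5j + (n-1)] and never fails
theorem pv_loop_eq (remaining : List String) (n : Int) (nn : Nat) (hn : n - 1 = (nn : Int))
    (hnn5 : nn < 5) (js : List Nat) (sel : List String)
    (hfull : ∀ j ∈ js, 5 * j + 5 ≤ remaining.length) :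
    (js.map (fun j => ((5 * j : Nat) : Int))).foldl (pvAStep remaining n) (some sel)
      = some (sel ++ js.map (fun j => remaining.getD (5 * j + nn) "")) := by
  induction js generalizing sel with
  | nil => simp
  | cons j js ih =>
    have hj : 5 * j + 5 ≤ remaining.length := hfull j (by simp)
    have hstep : pvAStep remaining n (some sel) ((5 * j : Nat) : Int)
        = some (sel ++ [remaining.getD (5 * j + nn) ""]) := by
      have hslice : PySem.List.slice remaining (some ((5 * j : Nat) : Int))
          (some (((5 * j : Nat) : Int) + 5)) = (remaining.drop (5 * j)).take 5 := by
        have : (((5 * j : Nat) : Int) + 5) = (((5 * j : Nat) : Int) + ((5 : Nat) : Int)) := by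
          push_cast; ring
        rw [this, PySem.List.slice_natCast_add]
      have hlen : ((remaining.drop (5 * j)).take 5).length = 5 := by
        simp [List.length_take, List.length_drop]; omega
      have hget : PySem.List.pyGetD ((remaining.drop (5 * j)).take 5) (n - 1) ""
          = remaining.getD (5 * j + nn) "" := by
        rw [hn, PySem.List.pyGetD_of_nonneg _ _ (by positivity)]
        simp only [Int.toNat_natCast]
        rw [List.getD_eq_getElem _ _ (by rw [hlen]; omega), List.getD_eq_getElem _ _ (by omega)]
        rw [List.getElem_take, List.getElem_drop]
      simp only [pvAStep, Option.bind_some, hslice, hlen, hget]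
      norm_num
    simp only [List.map_cons, List.foldl_cons, hstep]
    rw [ih (sel ++ [remaining.getD (5 * j + nn) ""]) (fun j hj => hfull j (by simp [hj]))]
    simp

-- pyRange 0 (5m) 5 enumerates the group starts 0, 5, …, 5(m-1)
theorem pv_range5 (m : Nat) :
    PySem.List.pyRange 0 ((5 * m : Nat) : Int) 5 = (List.range m).map (fun j => ((5 * j : Nat) : Int)) := by
  rw [PySem.List.pyRange_of_pos _ _ (by norm_num)]
  rcases Nat.eq_zero_or_pos m with hm | hm
  · subst hm; simp
  · have hlt : (0 : Int) < ((5 * m : Nat) : Int) := by positivity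
    rw [if_pos hlt]
    have : ((((5 * m : Nat) : Int) - 0 + 5 - 1) / 5).toNat = m := by
      push_cast; omega
    rw [this]
    apply List.map_congr_left
    intro k _; push_cast; ring

-- ===== VERDICT (by name: the statement is the Claim_ definition above) =====
theorem filter_form_data_by_group_spec : Claim_equal_filter_form_data_by_group := by
  intro data n _ hpre
  obtain ⟨hn1, hn5, hlen, hmod, hnd⟩ := hpre
  unfold Spec_filter_form_data_by_group filter_form_data_by_group filter_form_data_by_group_alt
  have hguard : ¬ ¬ (1 ≤ n ∧ n ≤ 5) := by tauto
  have hklen : (data.map Prod.fst).length = data.length := by simp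
  rw [if_neg hguard, if_neg hguard, hklen, if_neg (by omega), if_neg (by omega)]
  obtain ⟨m, hm⟩ : ∃ m : Nat, data.length = 2 + 5 * m := ⟨(data.length - 2) / 5, by omega⟩
  obtain ⟨nn, hnn, hnn5⟩ : ∃ nn : Nat, n - 1 = (nn : Int) ∧ nn < 5 :=
    ⟨(n - 1).toNat, by omega, by omega⟩
  -- B's divmod guard and group count
  have hrem : PySem.Int.mod ((data.length : Int) - 2) 5 = 0 := by
    rw [PySem.Int.mod_eq_emod_of_pos (by norm_num)]; omega
  have hfull : (PySem.Int.floordiv ((data.length : Int) - 2) 5).toNat = m := by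
    rw [PySem.Int.floordiv_eq_ediv_of_pos (by norm_num)]; omega
  rw [if_neg (fun h => h hrem), hfull]
  -- A's slices
  have hdrop : PySem.List.slice (data.map Prod.fst) (some 2) none = (data.map Prod.fst).drop 2 := by
    rw [PySem.List.slice_from _ (by norm_num)]; rfl
  have htake : PySem.List.slice (data.map Prod.fst) none (some 2) = (data.map Prod.fst).take 2 := by
    rw [PySem.List.slice_to _ (by norm_num)]; rfl
  have hrlen : ((data.map Prod.fst).drop 2).length = 5 * m := by simp [hm]
  rw [hdrop, htake, hrlen]
  -- A's loop over the full groups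
  rw [pv_range5 m, pv_loop_eq _ _ nn hnn hnn5 (List.range m) _ (by
    intro j hj; rw [List.length_drop, hklen, hm]
    have := List.mem_range.mp hj; omega)]
  -- both sides elementwise
  simp only [List.map_append, List.map_map]
  congr 1
  · -- the first two entries
    rw [← List.map_take, List.map_map]
    have : ∀ p ∈ data.take 2, ((fun k => (k, (data.lookup k).getD "")) ∘ Prod.fst) p = p := by
      intro p hp
      have hmem : p ∈ data := List.mem_of_mem_take hp
      simp [pv_lookup_eq_of_mem hnd hmem]
    rw [List.map_congr_left this]; simp
  · -- the group picks
    apply List.map_congr_left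
    intro j hj
    have hjm : j < m := List.mem_range.mp hj
    have hidx : 2 + 5 * j + nn < data.length := by omega
    have hgd : ((data.map Prod.fst).drop 2).getD (5 * j + nn) ""
        = (data[2 + 5 * j + nn]'hidx).1 := by
      rw [List.getD_eq_getElem _ _ (by rw [List.length_drop, hklen, hm]; omega)]
      rw [List.getElem_drop, List.getElem_map]
      simp only [show 2 + (5 * j + nn) = 2 + 5 * j + nn from by omega]
    have hB : PySem.List.pyGetD data (2 + 5 * (j : Int) + (n - 1)) ("", "")
        = data[2 + 5 * j + nn]'hidx := by
      rw [hnn, PySem.List.pyGetD_eq_getElem _ _ (by positivity) (by omega)]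
      simp only [show ((2 : Int) + 5 * (j : Int) + (nn : Int)).toNat = 2 + 5 * j + nn from by omega]
    simp only [Function.comp, hgd, hB]
    have hmem : data[2 + 5 * j + nn]'hidx ∈ data := List.getElem_mem _
    simp [pv_lookup_eq_of_mem hnd hmem]
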